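-- pv_equiv track=rewrite | github.com/brianmatthewthomas/generalUtilities | txDOT_search.py | reduceDupe
-- ===== SOURCE A (Python) =====
-- def reduceDupe(thingy):
--     thingy = list(thingy)
--     settler = set()
--     for item in thingy:
--         things = item.split("|")
--         for thing in things:
--             settler.add(thing)
--     settler = list(settler)
--     settler.sort()
--     return settler
-- ===== SOURCE B (Python) =====
-- def reduceDupe(thingy):
--     tokens = []
--     for item in thingy:
--         tokens.extend(item.split("|"))
--     tokens.sort()
--     result = []
--     for t in tokens:
--         if not result or result[-1] != t:
--             result.append(t)
--     return result
-- ===== Notes on version B (the rewrite author's own statement) =====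
-- stated objective: alternative
-- what changed: Replaces hash-set accumulation followed by a sort with flattening all pipe-split tokens into one list, sorting it once, and dropping the now-adjacent duplicates in a single consecutive-dedup pass.
import Mathlib
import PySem

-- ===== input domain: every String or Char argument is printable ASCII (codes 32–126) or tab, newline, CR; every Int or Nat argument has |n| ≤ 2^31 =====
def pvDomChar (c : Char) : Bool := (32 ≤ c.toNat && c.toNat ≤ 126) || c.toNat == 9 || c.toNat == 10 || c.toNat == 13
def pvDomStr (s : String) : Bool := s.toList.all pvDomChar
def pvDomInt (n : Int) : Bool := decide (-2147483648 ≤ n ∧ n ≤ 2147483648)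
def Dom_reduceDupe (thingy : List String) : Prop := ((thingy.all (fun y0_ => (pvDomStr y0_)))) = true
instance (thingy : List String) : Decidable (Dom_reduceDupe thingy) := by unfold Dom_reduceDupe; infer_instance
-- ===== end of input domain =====

-- B collects every pipe-split token into one flat list, sorts it once, and removes
-- the now-adjacent duplicates in a single pass, instead of A's set accumulation + sort.

-- ===== PORT A =====
def reduceDupe (thingy : List String) : List String :=
  -- settler = set(); for item in thingy: for thing in item.split("|"): settler.add(thing)
  -- item.split("|") = Str.split? item "|", which is some since the separator "|" is nonempty
  let settler : PySem.Set String :=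
    thingy.foldl (fun st item =>
      ((PySem.Str.split? item "|").getD []).foldl PySem.Set.add st) PySem.Set.empty
  -- settler = list(settler); settler.sort(); return settler
  PySem.List.sorted settler (fun x => x) false

-- ===== PORT B =====
def reduceDupe_alt (thingy : List String) : List String :=
  -- tokens = []; for item in thingy: tokens.extend(item.split("|"))
  let tokens := thingy.foldl (fun acc item => acc ++ (PySem.Str.split? item "|").getD []) []
  -- tokens.sort()
  let tokens := PySem.List.sorted tokens (fun x => x) false
  -- result = []; for t in tokens: if not result or result[-1] != t: result.append(t)
  tokens.foldl (fun res t => if res.getLast? = some t then res else res ++ [t]) []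

-- ===== PRECONDITION & SPEC =====
def Spec_reduceDupe (thingy : List String) (out : List String) : Prop := out = reduceDupe_alt thingy
instance (thingy : List String) (out : List String) : Decidable (Spec_reduceDupe thingy out) := by unfold Spec_reduceDupe; infer_instance

-- ===== CLAIM (what is proved, stated in full; the proofs are below) =====
def Claim_equal_reduceDupe : Prop := ∀ (thingy : List String), Dom_reduceDupe thingy → Spec_reduceDupe thingy (reduceDupe thingy)

-- ===== LEMMAS AND PROOFS =====

-- A's nested set-insertion loop is set-insertion over the flattened token list.
theorem foldl_add_flatMap (f : String → List String) :
    ∀ (l : List String) (init : PySem.Set String),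
      l.foldl (fun st item => (f item).foldl PySem.Set.add st) init
        = (l.flatMap f).foldl PySem.Set.add init := by
  intro l
  induction l with
  | nil => intro init; rfl
  | cons x xs ih =>
      intro init
      simp [List.foldl_cons, List.flatMap_cons, List.foldl_append, ih]

-- In a ≤-sorted list every member is at most the last element.
theorem le_getLast?_of_pairwise : ∀ (l : List String) (a L : String),
    l.Pairwise (· ≤ ·) → a ∈ l → l.getLast? = some L → a ≤ L := by
  intro l
  induction l with
  | nil => simp
  | cons x xs ih =>
      intro a L hp ha hL
      cases xs with
      | nil => simp at ha hL; subst ha; subst hL; rfl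
      | cons y ys =>
          rw [List.getLast?_cons_cons] at hL
          rcases List.mem_cons.mp ha with rfl | ha'
          · exact (List.pairwise_cons.mp hp).1 L (List.mem_of_getLast? hL)
          · exact ih a L hp.tail ha' hL

-- Membership through B's consecutive-dedup pass.
theorem dedup_mem (l : List String) :
    ∀ (acc : List String) (x : String),
      (x ∈ l.foldl (fun res t => if res.getLast? = some t then res else res ++ [t]) acc)
        ↔ x ∈ acc ∨ x ∈ l := by
  induction l with
  | nil => intro acc x; simp
  | cons t ts ih =>
      intro acc x
      by_cases h : acc.getLast? = some t
      · have ht : t ∈ acc := List.mem_of_getLast? h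
        simp only [List.foldl_cons, if_pos h, ih, List.mem_cons]
        constructor
        · rintro (ha | hts)
          · exact Or.inl ha
          · exact Or.inr (Or.inr hts)
        · rintro (ha | rfl | hts)
          · exact Or.inl ha
          · exact Or.inl ht
          · exact Or.inr hts
      · simp only [List.foldl_cons, if_neg h, ih, List.mem_append, List.mem_cons]
        tauto

-- B's consecutive-dedup pass over a ≤-sorted list yields a strictly increasing list.
theorem dedup_pairwise (l : List String) :
    ∀ (acc : List String), l.Pairwise (· ≤ ·) → acc.Pairwise (· < ·) →
      (∀ a ∈ acc, ∀ b ∈ l, a ≤ b) →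
      (l.foldl (fun res t => if res.getLast? = some t then res else res ++ [t]) acc).Pairwise
        (· < ·) := by
  induction l with
  | nil => intro acc _ hacc _; simpa using hacc
  | cons t ts ih =>
      intro acc hl hacc hbound
      have hl' : ts.Pairwise (· ≤ ·) := hl.tail
      have htle : ∀ b ∈ ts, t ≤ b := (List.pairwise_cons.mp hl).1
      by_cases h : acc.getLast? = some t
      · rw [List.foldl_cons, if_pos h]
        exact ih acc hl' hacc (fun a ha b hb =>
          le_trans (hbound a ha t (List.mem_cons_self ..)) (htle b hb))
      · rw [List.foldl_cons, if_neg h]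
        refine ih (acc ++ [t]) hl' ?_ ?_
        · rw [List.pairwise_append]
          refine ⟨hacc, List.pairwise_singleton _ _, ?_⟩
          intro a ha b hb
          rw [List.mem_singleton] at hb
          rcases lt_or_eq_of_le (hbound a ha t (List.mem_cons_self ..)) with hlt | heq
          · exact hb ▸ hlt
          · exfalso
            have hne : acc ≠ [] := List.ne_nil_of_mem ha
            obtain ⟨L, hL⟩ := Option.isSome_iff_exists.mp (List.getLast?_isSome.mpr hne)
            have haL : a ≤ L :=
              le_getLast?_of_pairwise acc a L (hacc.imp le_of_lt) ha hL
            have hLa : L ≤ t := hbound L (List.mem_of_getLast? hL) t (List.mem_cons_self ..)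
            have htL : t ≤ L := heq ▸ haL
            have hLt : L = t := le_antisymm hLa htL
            exact h (hLt ▸ hL)
        · intro a ha b hb
          rcases List.mem_append.mp ha with ha' | ha'
          · exact le_trans (hbound a ha' t (List.mem_cons_self ..)) (htle b hb)
          · rw [List.mem_singleton] at ha'; subst ha'; exact htle b hb

-- ===== VERDICT (by name: the statement is the Claim_ definition above) =====
theorem reduceDupe_spec : Claim_equal_reduceDupe := by
  intro thingy _
  unfold Spec_reduceDupe reduceDupe reduceDupe_alt
  simp only [PySem.List.foldl_append_eq_flatMap, List.nil_append]
  set toks := thingy.flatMap (fun item => (PySem.Str.split? item "|").getD []) with htoks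
  rw [foldl_add_flatMap, ← htoks]
  have hset : toks.foldl PySem.Set.add PySem.Set.empty = PySem.Set.ofList toks :=
    (PySem.Set.ofList_eq_foldl toks).symm
  rw [hset]
  set ys := (PySem.List.sorted toks (fun x => x) false).foldl
      (fun res t => if res.getLast? = some t then res else res ++ [t]) [] with hys
  have hpw : ys.Pairwise (· < ·) :=
    dedup_pairwise _ [] (PySem.List.sorted_pairwise toks (fun x => x)) List.Pairwise.nil
      (by simp)
  have hmem : ∀ x, x ∈ ys ↔ x ∈ PySem.Set.ofList toks := by
    intro x
    rw [hys, dedup_mem, PySem.List.mem_sorted, PySem.Set.mem_ofList]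
    simp
  have hperm : ys.Perm (PySem.Set.ofList toks) := by
    rw [List.perm_ext_iff_of_nodup (hpw.imp ne_of_lt) (PySem.Set.nodup_ofList toks)]
    exact hmem
  exact PySem.List.sorted_eq_of_perm_of_pairwise_lt _ ys (fun x => x) hperm hpw
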